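-- pv_equiv track=rewrite | github.com/jklementowski/opinium | fun2.py | can_form_anagram
-- ===== SOURCE A (Python) =====
-- def can_form_anagram(str1: str, str2: str) -> bool:
--     def count_chars(s):
--         count = {}
--         s = s.lower()
--         for char in s:
--             if char in count:
--                 count[char]+=1
--             else:
--                 count[char]=1
--         return count
--     str1_count = count_chars(str1)
--     str2_count = count_chars(str2)
--
--     for char in str1_count:
--         if str1_count[char] > str2_count.get(char,0):
--             return False
--
--     return True
-- ===== SOURCE B (Python) =====
-- def can_form_anagram(str1: str, str2: str) -> bool:
--     # Count only str2, then consume the counts in a single pass over str1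
--     # with early exit.
--     count = {}
--     for ch in str2.lower():
--         count[ch] = count.get(ch, 0) + 1
--     for ch in str1.lower():
--         if count.get(ch, 0) == 0:
--             return False
--         count[ch] -= 1
--     return True
-- ===== Notes on version B (the rewrite author's own statement) =====
-- stated objective: simpler
-- what changed: B builds only one frequency dict (for str2) and validates str1 in a single consuming pass with early exit, instead of building two full counters and then comparing them key by key.
import Mathlib
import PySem

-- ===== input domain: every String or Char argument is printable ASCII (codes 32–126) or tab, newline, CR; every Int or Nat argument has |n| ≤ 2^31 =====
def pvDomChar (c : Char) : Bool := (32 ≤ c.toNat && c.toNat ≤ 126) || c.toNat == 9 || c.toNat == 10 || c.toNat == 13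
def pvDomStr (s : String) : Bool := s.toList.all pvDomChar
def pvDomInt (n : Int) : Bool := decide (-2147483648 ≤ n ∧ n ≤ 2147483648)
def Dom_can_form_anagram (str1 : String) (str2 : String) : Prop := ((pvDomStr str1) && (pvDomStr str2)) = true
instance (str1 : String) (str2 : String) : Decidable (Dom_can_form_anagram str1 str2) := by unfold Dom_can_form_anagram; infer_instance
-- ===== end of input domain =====

-- B builds only one frequency dict (for str2) and validates str1 in a single
-- consuming pass with early exit, instead of A's two counters compared key by key
-- (objective: simpler; same asymptotic cost).

-- ===== PORT A =====
-- count_chars: count = {}; for char in s.lower(): if char in count: count[char]+=1 else: count[char]=1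
def pvCountChars (s : String) : PySem.Dict Char Int :=
  (PySem.Str.lower s).toList.foldl
    (fun count char =>
      if count.contains char then count.modify char 0 (· + 1) else count.insert char 1)
    PySem.Dict.empty

-- for char in str1_count: if str1_count[char] > str2_count.get(char,0): return False
-- (str1_count[char] cannot raise here: char is drawn from str1_count's own keys,
--  so d1.getD char 0 is exact)
def pvCheckKeys (d1 d2 : PySem.Dict Char Int) : List Char → Bool
  | [] => true
  | char :: rest =>
      if d1.getD char 0 > d2.getD char 0 then false else pvCheckKeys d1 d2 rest

def can_form_anagram (str1 : String) (str2 : String) : Bool :=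
  let str1_count := pvCountChars str1
  let str2_count := pvCountChars str2
  pvCheckKeys str1_count str2_count str1_count.keys

-- ===== PORT B =====
-- for ch in str1.lower(): if count.get(ch,0)==0: return False; count[ch] -= 1
-- (count[ch] -= 1 only runs when ch is a key, so modify ch 0 (· - 1) is exact)
def pvConsume (count : PySem.Dict Char Int) : List Char → Bool
  | [] => true
  | ch :: rest =>
      if count.getD ch 0 == 0 then false
      else pvConsume (count.modify ch 0 (· - 1)) rest

def can_form_anagram_alt (str1 : String) (str2 : String) : Bool :=
  let count := (PySem.Str.lower str2).toList.foldl
    (fun count ch => count.insert ch (count.getD ch 0 + 1)) PySem.Dict.empty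
  pvConsume count (PySem.Str.lower str1).toList

-- ===== PRECONDITION & SPEC =====
def Spec_can_form_anagram (str1 : String) (str2 : String) (out : Bool) : Prop := out = can_form_anagram_alt str1 str2
instance (str1 : String) (str2 : String) (out : Bool) : Decidable (Spec_can_form_anagram str1 str2 out) := by unfold Spec_can_form_anagram; infer_instance

-- ===== CLAIM (what is proved, stated in full; the proofs are below) =====
def Claim_equal_can_form_anagram : Prop := ∀ (str1 : String) (str2 : String), Dom_can_form_anagram str1 str2 → Spec_can_form_anagram str1 str2 (can_form_anagram str1 str2)

-- ===== LEMMAS AND PROOFS =====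

-- A's branching counter loop counts occurrences
theorem pvCountFold_getD (l : List Char) (d : PySem.Dict Char Int) (c : Char) :
    (l.foldl (fun count char =>
        if count.contains char then count.modify char 0 (· + 1) else count.insert char 1) d).getD c 0
      = d.getD c 0 + l.count c := by
  induction l generalizing d with
  | nil => simp
  | cons a l ih =>
      simp only [List.foldl_cons]
      rw [ih]
      by_cases h : d.contains a = true
      · rw [if_pos h]
        by_cases hc : c = a
        · subst hc
          rw [PySem.Dict.getD_modify, if_pos rfl, List.count_cons_self]
          push_cast; ring
        · rw [PySem.Dict.getD_modify, if_neg hc, List.count_cons_of_ne (Ne.symm hc)]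
      · rw [if_neg h]
        have h0 : d.getD a 0 = 0 := PySem.Dict.getD_of_not_contains d (0:Int) (by simpa using h)
        by_cases hc : c = a
        · subst hc
          rw [PySem.Dict.getD_insert, if_pos rfl, h0, List.count_cons_self]
          push_cast; ring
        · rw [PySem.Dict.getD_insert, if_neg hc, List.count_cons_of_ne (Ne.symm hc)]

theorem pvCountFold_mem_keys (l : List Char) (d : PySem.Dict Char Int) (c : Char) :
    c ∈ (l.foldl (fun count char =>
        if count.contains char then count.modify char 0 (· + 1) else count.insert char 1) d).keys
      ↔ c ∈ d.keys ∨ c ∈ l := by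
  induction l generalizing d with
  | nil => simp
  | cons a l ih =>
      simp only [List.foldl_cons, ih, List.mem_cons]
      by_cases h : d.contains a = true
      · rw [if_pos h]
        rw [PySem.Dict.keys_modify, PySem.Dict.mem_keys_insert]
        have := (PySem.Dict.contains_iff_mem_keys d a).mp h
        constructor
        · rintro (⟨rfl | hm⟩ | hl) <;> tauto
        · rintro (hm | rfl | hl) <;> tauto
      · rw [if_neg h, PySem.Dict.mem_keys_insert]; tauto

theorem pvCheckKeys_iff (d1 d2 : PySem.Dict Char Int) (ks : List Char) :
    pvCheckKeys d1 d2 ks = true ↔ ∀ c ∈ ks, d1.getD c 0 ≤ d2.getD c 0 := by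
  induction ks with
  | nil => simp [pvCheckKeys]
  | cons a ks ih =>
      simp only [pvCheckKeys]
      split_ifs with h
      · constructor
        · intro hf; cases hf
        · intro hall
          exact absurd (hall a (List.mem_cons_self)) (by omega)
      · simp only [ih, List.mem_cons]
        constructor
        · intro hall c hmem
          rcases hmem with rfl | hc
          · omega
          · exact hall c hc
        · intro hall c hc
          exact hall c (Or.inr hc)

theorem pvConsume_iff (l : List Char) (cnt : PySem.Dict Char Int)
    (hn : ∀ c, 0 ≤ cnt.getD c 0) :
    pvConsume cnt l = true ↔ ∀ c, (l.count c : Int) ≤ cnt.getD c 0 := by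
  induction l generalizing cnt with
  | nil =>
      simp only [pvConsume, List.count_nil, Nat.cast_zero, true_iff]
      exact hn
  | cons a l ih =>
      simp only [pvConsume]
      split_ifs with h0
      · simp only [beq_iff_eq] at h0
        constructor
        · intro hf; cases hf
        · intro hall
          exfalso
          have h2 := hall a
          rw [h0, List.count_cons_self] at h2
          push_cast at h2
          have : (0 : Int) ≤ l.count a := by positivity
          omega
      · simp only [beq_iff_eq] at h0
        have h1 : 1 ≤ cnt.getD a 0 := by have := hn a; omega
        have hn' : ∀ c, 0 ≤ (cnt.modify a 0 (· - 1)).getD c 0 := by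
          intro c; rw [PySem.Dict.getD_modify]
          split_ifs with hc
          · omega
          · exact hn c
        rw [ih _ hn']
        constructor
        · intro hall c
          have h2 := hall c
          rw [PySem.Dict.getD_modify] at h2
          by_cases hc : c = a
          · subst hc
            rw [if_pos rfl] at h2
            rw [List.count_cons_self]
            push_cast
            omega
          · rw [if_neg hc] at h2
            rwa [List.count_cons_of_ne (Ne.symm hc)]
        · intro hall c
          rw [PySem.Dict.getD_modify]
          have h2 := hall c
          by_cases hc : c = a
          · subst hc
            rw [if_pos rfl]
            rw [List.count_cons_self] at h2
            push_cast at h2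
            omega
          · rw [if_neg hc]
            rwa [List.count_cons_of_ne (Ne.symm hc)] at h2

-- ===== VERDICT (by name: the statement is the Claim_ definition above) =====
theorem can_form_anagram_spec : Claim_equal_can_form_anagram := by
  intro str1 str2 _
  unfold Spec_can_form_anagram can_form_anagram can_form_anagram_alt
  set l1 := (PySem.Str.lower str1).toList with hl1
  set l2 := (PySem.Str.lower str2).toList with hl2
  rw [Bool.eq_iff_iff]
  have hA : pvCountChars str1 = l1.foldl
      (fun count char =>
        if count.contains char then count.modify char 0 (· + 1) else count.insert char 1)
      PySem.Dict.empty := rfl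
  have hA2 : pvCountChars str2 = l2.foldl
      (fun count char =>
        if count.contains char then count.modify char 0 (· + 1) else count.insert char 1)
      PySem.Dict.empty := rfl
  simp only [pvCheckKeys_iff, hA, hA2]
  have hgd1 : ∀ c, (pvCountChars str1).getD c 0 = (l1.count c : Int) := by
    intro c; rw [hA, pvCountFold_getD]; simp
  have hgd2 : ∀ c, (pvCountChars str2).getD c 0 = (l2.count c : Int) := by
    intro c; rw [hA2, pvCountFold_getD]; simp
  have hB : ∀ c, ((l2.foldl (fun count ch => count.insert ch (count.getD ch 0 + 1))
      PySem.Dict.empty).getD c 0) = (l2.count c : Int) := by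
    intro c; rw [PySem.Dict.getD_foldl_insert_add_one]; simp
  rw [pvConsume_iff _ _ (by intro c; rw [hB]; positivity)]
  rw [← hA, ← hA2]
  constructor
  · intro hall c
    rw [hB]
    by_cases hc : c ∈ l1
    · have := hall c (by rw [hA, pvCountFold_mem_keys]; simp [hc])
      rw [hgd1, hgd2] at this; exact this
    · have : l1.count c = 0 := List.count_eq_zero.mpr hc
      rw [this]; positivity
  · intro hall c _
    rw [hgd1, hgd2]
    have := hall c; rw [hB] at this; exact this
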